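-- pv_equiv track=rewrite | github.com/verdugong/Agent-IA-Panaderia | backend/app/function_graph.py | get_related_functions
-- ===== SOURCE A (Python) =====
-- FUNCTION_GRAPH = {
--     "nodes": [
--         {"id": "saludar_cortesia", "label": "Saludar/Cortesía", "tipo": "entrada"},
--         {"id": "buscar_producto", "label": "Buscar Producto", "tipo": "consulta"},
--         {"id": "consultar_precio_promos", "label": "Consultar Precio", "tipo": "consulta"},
--         {"id": "recomendar_productos", "label": "Recomendar", "tipo": "consulta"},
--         {"id": "crear_pedido", "label": "Crear Pedido", "tipo": "transaccion"},
--         {"id": "actualizar_pedido", "label": "Actualizar Pedido", "tipo": "transaccion"},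
--         {"id": "cancelar_pedido", "label": "Cancelar Pedido", "tipo": "transaccion"},
--         {"id": "consultar_estado_pedido", "label": "Estado Pedido", "tipo": "consulta"},
--         {"id": "calcular_costo_envio", "label": "Costo Envío", "tipo": "consulta"},
--         {"id": "registrar_cliente", "label": "Registrar Cliente", "tipo": "transaccion"},
--         {"id": "consultar_horarios_ubicaciones", "label": "Horarios/Ubicación", "tipo": "consulta"},
--         {"id": "responder_fuera_contexto", "label": "Fuera de Contexto", "tipo": "fallback"},
--     ],
--     "edges": [
--         # Flujo típico de compra
--         {"from": "saludar_cortesia", "to": "buscar_producto", "rel": "PUEDE_LLEVAR_A"},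
--         {"from": "saludar_cortesia", "to": "recomendar_productos", "rel": "PUEDE_LLEVAR_A"},
--         {"from": "saludar_cortesia", "to": "consultar_horarios_ubicaciones", "rel": "PUEDE_LLEVAR_A"},
--
--         # Búsqueda → Precio → Pedido
--         {"from": "buscar_producto", "to": "consultar_precio_promos", "rel": "SIGUIENTE_PASO"},
--         {"from": "consultar_precio_promos", "to": "crear_pedido", "rel": "SIGUIENTE_PASO"},
--         {"from": "recomendar_productos", "to": "consultar_precio_promos", "rel": "SIGUIENTE_PASO"},
--
--         # Flujo de pedido
--         {"from": "crear_pedido", "to": "calcular_costo_envio", "rel": "REQUIERE"},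
--         {"from": "crear_pedido", "to": "registrar_cliente", "rel": "REQUIERE"},
--         {"from": "crear_pedido", "to": "actualizar_pedido", "rel": "PUEDE_LLEVAR_A"},
--         {"from": "crear_pedido", "to": "cancelar_pedido", "rel": "PUEDE_LLEVAR_A"},
--         {"from": "crear_pedido", "to": "consultar_estado_pedido", "rel": "PUEDE_LLEVAR_A"},
--
--         # Modificaciones de pedido
--         {"from": "actualizar_pedido", "to": "consultar_estado_pedido", "rel": "SIGUIENTE_PASO"},
--         {"from": "cancelar_pedido", "to": "saludar_cortesia", "rel": "REINICIA_FLUJO"},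
--
--         # Fallback desde cualquier lugar
--         {"from": "buscar_producto", "to": "responder_fuera_contexto", "rel": "FALLBACK"},
--         {"from": "consultar_precio_promos", "to": "responder_fuera_contexto", "rel": "FALLBACK"},
--         {"from": "crear_pedido", "to": "responder_fuera_contexto", "rel": "FALLBACK"},
--     ]
-- }
--
-- def get_related_functions(function_id: str) -> list:
--     """Obtiene funciones relacionadas a una función dada."""
--     related = []
--     for edge in FUNCTION_GRAPH["edges"]:
--         if edge["from"] == function_id:
--             related.append({"function": edge["to"], "relation": edge["rel"]})
--         elif edge["to"] == function_id:
--             related.append({"function": edge["from"], "relation": f"INVERSO_{edge['rel']}"})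
--     return related
-- ===== SOURCE B (Python) =====
-- FUNCTION_GRAPH = {
--     "nodes": [
--         {"id": "saludar_cortesia", "label": "Saludar/Cortesía", "tipo": "entrada"},
--         {"id": "buscar_producto", "label": "Buscar Producto", "tipo": "consulta"},
--         {"id": "consultar_precio_promos", "label": "Consultar Precio", "tipo": "consulta"},
--         {"id": "recomendar_productos", "label": "Recomendar", "tipo": "consulta"},
--         {"id": "crear_pedido", "label": "Crear Pedido", "tipo": "transaccion"},
--         {"id": "actualizar_pedido", "label": "Actualizar Pedido", "tipo": "transaccion"},
--         {"id": "cancelar_pedido", "label": "Cancelar Pedido", "tipo": "transaccion"},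
--         {"id": "consultar_estado_pedido", "label": "Estado Pedido", "tipo": "consulta"},
--         {"id": "calcular_costo_envio", "label": "Costo Envío", "tipo": "consulta"},
--         {"id": "registrar_cliente", "label": "Registrar Cliente", "tipo": "transaccion"},
--         {"id": "consultar_horarios_ubicaciones", "label": "Horarios/Ubicación", "tipo": "consulta"},
--         {"id": "responder_fuera_contexto", "label": "Fuera de Contexto", "tipo": "fallback"},
--     ],
--     "edges": [
--         {"from": "saludar_cortesia", "to": "buscar_producto", "rel": "PUEDE_LLEVAR_A"},
--         {"from": "saludar_cortesia", "to": "recomendar_productos", "rel": "PUEDE_LLEVAR_A"},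
--         {"from": "saludar_cortesia", "to": "consultar_horarios_ubicaciones", "rel": "PUEDE_LLEVAR_A"},
--         {"from": "buscar_producto", "to": "consultar_precio_promos", "rel": "SIGUIENTE_PASO"},
--         {"from": "consultar_precio_promos", "to": "crear_pedido", "rel": "SIGUIENTE_PASO"},
--         {"from": "recomendar_productos", "to": "consultar_precio_promos", "rel": "SIGUIENTE_PASO"},
--         {"from": "crear_pedido", "to": "calcular_costo_envio", "rel": "REQUIERE"},
--         {"from": "crear_pedido", "to": "registrar_cliente", "rel": "REQUIERE"},
--         {"from": "crear_pedido", "to": "actualizar_pedido", "rel": "PUEDE_LLEVAR_A"},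
--         {"from": "crear_pedido", "to": "cancelar_pedido", "rel": "PUEDE_LLEVAR_A"},
--         {"from": "crear_pedido", "to": "consultar_estado_pedido", "rel": "PUEDE_LLEVAR_A"},
--         {"from": "actualizar_pedido", "to": "consultar_estado_pedido", "rel": "SIGUIENTE_PASO"},
--         {"from": "cancelar_pedido", "to": "saludar_cortesia", "rel": "REINICIA_FLUJO"},
--         {"from": "buscar_producto", "to": "responder_fuera_contexto", "rel": "FALLBACK"},
--         {"from": "consultar_precio_promos", "to": "responder_fuera_contexto", "rel": "FALLBACK"},
--         {"from": "crear_pedido", "to": "responder_fuera_contexto", "rel": "FALLBACK"},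
--     ]
-- }
--
-- # Adjacency index precomputed ONCE from the edge list, in edge order, so each
-- # node's cached entries match A's per-call scan order exactly.
-- _INDEX = {}
-- for _e in FUNCTION_GRAPH["edges"]:
--     _INDEX.setdefault(_e["from"], []).append({"function": _e["to"], "relation": _e["rel"]})
--     _INDEX.setdefault(_e["to"], []).append({"function": _e["from"], "relation": "INVERSO_" + _e["rel"]})
--
--
-- def get_related_functions(function_id: str) -> list:
--     """Obtiene funciones relacionadas a una función dada."""
--     return [dict(d) for d in _INDEX.get(function_id, [])]
-- ===== Notes on version B (the rewrite author's own statement) =====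
-- stated objective: simpler
-- what changed: B precomputes a module-level adjacency index (node -> list of related entries, built once in edge order) so the call itself is a single dict lookup returning a copy, instead of A's per-call scan of all 16 edges with two comparisons each.
import Mathlib
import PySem

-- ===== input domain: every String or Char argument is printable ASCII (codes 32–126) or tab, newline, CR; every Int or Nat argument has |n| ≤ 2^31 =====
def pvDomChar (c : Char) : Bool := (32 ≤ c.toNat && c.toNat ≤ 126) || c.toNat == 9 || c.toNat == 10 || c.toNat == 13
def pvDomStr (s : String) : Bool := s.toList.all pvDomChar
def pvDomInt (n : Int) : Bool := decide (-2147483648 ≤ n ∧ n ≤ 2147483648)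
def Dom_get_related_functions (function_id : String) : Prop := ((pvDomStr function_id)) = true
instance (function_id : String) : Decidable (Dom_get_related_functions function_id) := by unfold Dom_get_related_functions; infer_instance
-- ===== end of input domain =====

-- B replaces A's per-call edge scan by a lookup in an adjacency index precomputed once from the edge list (objective: simpler call-time code).

-- ===== PORT A =====
-- FUNCTION_GRAPH["edges"]: each edge dict has the literal keys "from","to","rel", always present,
-- so edge["from"]/edge["to"]/edge["rel"] are ported exactly as the tuple projections e.1 / e.2.1 / e.2.2.
def pvEdges : List (String × String × String) :=
  [ ("saludar_cortesia", "buscar_producto", "PUEDE_LLEVAR_A"),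
    ("saludar_cortesia", "recomendar_productos", "PUEDE_LLEVAR_A"),
    ("saludar_cortesia", "consultar_horarios_ubicaciones", "PUEDE_LLEVAR_A"),
    ("buscar_producto", "consultar_precio_promos", "SIGUIENTE_PASO"),
    ("consultar_precio_promos", "crear_pedido", "SIGUIENTE_PASO"),
    ("recomendar_productos", "consultar_precio_promos", "SIGUIENTE_PASO"),
    ("crear_pedido", "calcular_costo_envio", "REQUIERE"),
    ("crear_pedido", "registrar_cliente", "REQUIERE"),
    ("crear_pedido", "actualizar_pedido", "PUEDE_LLEVAR_A"),
    ("crear_pedido", "cancelar_pedido", "PUEDE_LLEVAR_A"),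
    ("crear_pedido", "consultar_estado_pedido", "PUEDE_LLEVAR_A"),
    ("actualizar_pedido", "consultar_estado_pedido", "SIGUIENTE_PASO"),
    ("cancelar_pedido", "saludar_cortesia", "REINICIA_FLUJO"),
    ("buscar_producto", "responder_fuera_contexto", "FALLBACK"),
    ("consultar_precio_promos", "responder_fuera_contexto", "FALLBACK"),
    ("crear_pedido", "responder_fuera_contexto", "FALLBACK") ]

def get_related_functions (function_id : String) : List (List (String × String)) :=
  pvEdges.foldl (fun related e =>
    if e.1 == function_id then
      related ++ [[("function", e.2.1), ("relation", e.2.2)]]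
    else if e.2.1 == function_id then
      related ++ [[("function", e.1), ("relation", "INVERSO_" ++ e.2.2)]]
    else related) []

-- ===== PORT B =====
-- _INDEX: built once by folding setdefault(...).append(...) over the edges; setdefault+append on
-- an immutable-list value is getD followed by insert of the extended list.
def pvIndex : PySem.Dict String (List (List (String × String))) :=
  pvEdges.foldl (fun d e =>
    let d := d.insert e.1 (d.getD e.1 [] ++ [[("function", e.2.1), ("relation", e.2.2)]])
    d.insert e.2.1 (d.getD e.2.1 [] ++ [[("function", e.1), ("relation", "INVERSO_" ++ e.2.2)]]))
    PySem.Dict.empty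

-- [dict(d) for d in _INDEX.get(function_id, [])]: dict(d) is a fresh copy of d, identity on the value,
-- so the comprehension is a map of the identity over the cached list.
def get_related_functions_alt (function_id : String) : List (List (String × String)) :=
  (pvIndex.getD function_id []).map (fun d => d)

-- ===== PRECONDITION & SPEC =====
def Spec_get_related_functions (function_id : String) (out : List (List (String × String))) : Prop := out = get_related_functions_alt function_id
instance (function_id : String) (out : List (List (String × String))) : Decidable (Spec_get_related_functions function_id out) := by unfold Spec_get_related_functions; infer_instance

-- ===== CLAIM (what is proved, stated in full; the proofs are below) =====
def Claim_equal_get_related_functions : Prop := ∀ (function_id : String), Dom_get_related_functions function_id → Spec_get_related_functions function_id (get_related_functions function_id)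

-- ===== LEMMAS AND PROOFS =====

-- All node ids that occur in pvEdges (as "from" or "to").
def pvIds : List String :=
  [ "saludar_cortesia", "buscar_producto", "recomendar_productos",
    "consultar_horarios_ubicaciones", "consultar_precio_promos", "crear_pedido",
    "calcular_costo_envio", "registrar_cliente", "actualizar_pedido",
    "cancelar_pedido", "consultar_estado_pedido", "responder_fuera_contexto" ]

lemma pvIndex_keys : pvIndex.keys = pvIds := by decide

lemma pv_main (function_id : String) :
    get_related_functions function_id = get_related_functions_alt function_id := by
  by_cases h : function_id ∈ pvIds
  · simp only [pvIds, List.mem_cons, List.not_mem_nil, or_false] at h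
    rcases h with rfl | rfl | rfl | rfl | rfl | rfl | rfl | rfl | rfl | rfl | rfl | rfl <;> decide
  · -- unknown id: A's scan matches no edge, B's lookup misses every key
    simp only [pvIds, List.mem_cons, List.not_mem_nil, or_false, not_or] at h
    obtain ⟨h1, h2, h3, h4, h5, h6, h7, h8, h9, h10, h11, h12⟩ := h
    have hB : get_related_functions_alt function_id = [] := by
      have : pvIndex.get? function_id = none := by
        rw [PySem.Dict.get?_eq_none_iff_not_mem_keys, pvIndex_keys]
        simp [pvIds, h1, h2, h3, h4, h5, h6, h7, h8, h9, h10, h11, h12]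
      simp [get_related_functions_alt, PySem.Dict.getD_eq_get?_getD, this]
    rw [hB]
    simp [get_related_functions, pvEdges, List.foldl, beq_iff_eq,
      Ne.symm h1, Ne.symm h2, Ne.symm h3, Ne.symm h4, Ne.symm h5, Ne.symm h6,
      Ne.symm h7, Ne.symm h8, Ne.symm h9, Ne.symm h10, Ne.symm h11, Ne.symm h12]

-- ===== VERDICT (by name: the statement is the Claim_ definition above) =====
theorem get_related_functions_spec : Claim_equal_get_related_functions := by
  intro fid _
  unfold Spec_get_related_functions
  exact pv_main fid
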